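-- pv_equiv track=rewrite | github.com/Antonio-Maschio/AML_FProject | pathtest.py | count_paths_and_lengths
-- ===== SOURCE A (Python) =====
-- def is_valid(x, y, grid, visited):
--     rows = len(grid)
--     cols = len(grid[0])
--     return 0 <= x < rows and 0 <= y < cols and grid[x][y] == 1 and not visited[x][y]
--
-- def dfs_count_paths(grid, start, end, visited, path_length, path_lengths):
--     x, y = start
--     if start == end:
--         path_lengths.append(path_length)
--         return 1
--     visited[x][y] = True
--     path_count = 0
--     directions = [(-1, 0), (1, 0), (0, -1), (0, 1)]
--     for dx, dy in directions:
--         nx, ny = x + dx, y + dy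
--         if is_valid(nx, ny, grid, visited):
--             path_count += dfs_count_paths(grid, (nx, ny), end, visited, path_length + 1, path_lengths)
--
--     visited[x][y] = False
--     return path_count
--
-- def count_paths_and_lengths(grid, start, end):
--     if not grid or not start or not end:
--         return 0, []
--     if grid[start[0]][start[1]] != 1 or grid[end[0]][end[1]] != 1:
--         return 0, []
--     rows, cols = len(grid), len(grid[0])
--     visited = [[False for _ in range(cols)] for _ in range(rows)]
--     path_lengths = []
--     total_paths = dfs_count_paths(grid, start, end, visited, 0, path_lengths)
--     return total_paths, path_lengths
-- ===== SOURCE B (Python) =====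
-- def count_paths_and_lengths(grid, start, end):
--     if not grid or not start or not end:
--         return 0, []
--     if grid[start[0]][start[1]] != 1 or grid[end[0]][end[1]] != 1:
--         return 0, []
--     rows, cols = len(grid), len(grid[0])
--     visited = [[False] * cols for _ in range(rows)]
--     count, lengths = 0, []
--     # explicit stack of frames: ("visit", x, y, path_length) or ("unvisit", x, y, 0)
--     stack = [("visit", start[0], start[1], 0)]
--     while stack:
--         kind, x, y, length = stack.pop()
--         if kind == "unvisit":
--             visited[x][y] = False
--             continue
--         if (x, y) == end:
--             count += 1
--             lengths.append(length)
--             continue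
--         visited[x][y] = True
--         stack.append(("unvisit", x, y, 0))
--         # push neighbors reversed so they pop in up/down/left/right order
--         for dx, dy in reversed([(-1, 0), (1, 0), (0, -1), (0, 1)]):
--             nx, ny = x + dx, y + dy
--             if 0 <= nx < rows and 0 <= ny < cols and grid[nx][ny] == 1 and not visited[nx][ny]:
--                 stack.append(("visit", nx, ny, length + 1))
--     return count, lengths
-- ===== Notes on version B (the rewrite author's own statement) =====
-- stated objective: alternative
-- what changed: A's recursive backtracking DFS (with a mutated visited matrix restored on return) is replaced by a single iterative loop over an explicit stack of visit/unvisit frames, pushing valid neighbors in reversed order so paths are found and counted in the same order.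
-- outside the precondition, e.g. on count_paths_and_lengths([[0, 1, 1, 1], [0, 0, 0]], (0, -3), (0, -3)): A returns (1, [0]), B returns (1, [0]); on count_paths_and_lengths([[1, 1, 1], [0, 1, 1, 0], [0, 0, 0, 1]], (1, 1), (-3, 0)): A returns (0, []), B returns (0, [])
import Mathlib
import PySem

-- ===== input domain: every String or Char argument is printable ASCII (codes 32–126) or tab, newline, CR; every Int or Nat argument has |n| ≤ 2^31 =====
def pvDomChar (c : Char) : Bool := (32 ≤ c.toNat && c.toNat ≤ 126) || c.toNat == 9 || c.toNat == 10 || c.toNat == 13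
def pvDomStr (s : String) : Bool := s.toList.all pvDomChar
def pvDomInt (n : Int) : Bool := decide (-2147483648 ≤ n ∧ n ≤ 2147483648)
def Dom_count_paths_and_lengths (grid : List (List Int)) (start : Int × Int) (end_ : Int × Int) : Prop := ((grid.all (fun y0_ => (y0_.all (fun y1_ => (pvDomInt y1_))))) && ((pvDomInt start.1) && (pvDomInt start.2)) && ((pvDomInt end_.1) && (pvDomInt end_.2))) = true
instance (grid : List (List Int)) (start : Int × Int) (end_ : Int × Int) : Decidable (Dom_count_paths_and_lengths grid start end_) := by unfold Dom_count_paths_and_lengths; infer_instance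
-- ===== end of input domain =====

-- B replaces A's recursive backtracking DFS by an iterative DFS over an explicit stack of
-- visit/unvisit frames (objective: alternative decomposition, same asymptotic cost).
-- Proved for the return value only; A also fills a local visited matrix it discards.

-- Python-exact 2D cell access m[i][j] (negative wrap): read gives none on IndexError,
-- write leaves m unchanged there — those inputs are excluded by Pre_.
def pvGet2 {α : Type} (m : List (List α)) (i j : Int) : Option α :=
  (PySem.List.pyGet? m i).bind (fun r => PySem.List.pyGet? r j)

def pvSet2 {α : Type} (m : List (List α)) (i j : Int) (a : α) : List (List α) :=
  match PySem.List.pyGet? m i with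
  | some r => PySem.List.pySetD m i (PySem.List.pySetD r j a)
  | none => m

-- ===== PORT A =====
def is_valid (x y : Int) (grid : List (List Int)) (visited : List (List Bool)) : Bool :=
  let rows : Int := grid.length
  let cols : Int := (grid.headD []).length
  decide (0 ≤ x) && decide (x < rows) && decide (0 ≤ y) && decide (y < cols) &&
    ((pvGet2 grid x y).getD 0 == 1) && !((pvGet2 visited x y).getD true)

-- fuel only makes the recursion total; the caller passes more fuel than the recursion depth can reach
def dfs_count_paths (fuel : Nat) (grid : List (List Int)) (start end_ : Int × Int)
    (visited : List (List Bool)) (path_length : Int) (path_lengths : List Int) :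
    Int × List Int × List (List Bool) :=
  match fuel with
  | 0 => (0, path_lengths, visited)
  | fuel' + 1 =>
    if start = end_ then (1, path_lengths ++ [path_length], visited)
    else
      let x := start.1
      let y := start.2
      let visited1 := pvSet2 visited x y true
      let directions : List (Int × Int) := [(-1,0),(1,0),(0,-1),(0,1)]
      let st := directions.foldl (fun (acc : Int × List Int × List (List Bool)) d =>
        let nx := x + d.1
        let ny := y + d.2
        if is_valid nx ny grid acc.2.2 then
          let r := dfs_count_paths fuel' grid (nx, ny) end_ acc.2.2 (path_length + 1) acc.2.1
          (acc.1 + r.1, r.2.1, r.2.2)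
        else acc) (0, path_lengths, visited1)
      (st.1, st.2.1, pvSet2 st.2.2 x y false)

def count_paths_and_lengths (grid : List (List Int)) (start : Int × Int) (end_ : Int × Int) : Int × List Int :=
  -- 'not start' / 'not end' are always false for a pair, so only the grid emptiness test remains
  if grid = [] then (0, [])
  else if (pvGet2 grid start.1 start.2).getD 0 ≠ 1 ∨ (pvGet2 grid end_.1 end_.2).getD 0 ≠ 1 then (0, [])
  else
    let rows := grid.length
    let cols := (grid.headD []).length
    let visited := List.replicate rows (List.replicate cols false)
    let r := dfs_count_paths (rows * cols + 1) grid start end_ visited 0 []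
    (r.1, r.2.1)

-- ===== PORT B =====
inductive PFrame where
  | visit : Int → Int → Int → PFrame
  | unvisit : Int → Int → PFrame
deriving DecidableEq, Repr

-- the inline neighbor test of B's while-loop
def neighbor_ok (grid : List (List Int)) (visited : List (List Bool)) (nx ny : Int) : Bool :=
  decide (0 ≤ nx ∧ nx < (grid.length : Int) ∧ 0 ≤ ny ∧ ny < ((grid.headD []).length : Int)) &&
    ((pvGet2 grid nx ny).getD 0 == 1) && !((pvGet2 visited nx ny).getD true)

-- the while-loop over the explicit stack; fuel only makes it total (the caller passes
-- more fuel than the loop can ever pop)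
def bstep (grid : List (List Int)) (end_ : Int × Int) :
    Nat → List PFrame → List (List Bool) → Int → List Int → Int × List Int
  | _, [], _, count, lengths => (count, lengths)
  | 0, _ :: _, _, count, lengths => (count, lengths)
  | f + 1, PFrame.unvisit x y :: rest, visited, count, lengths =>
      bstep grid end_ f rest (pvSet2 visited x y false) count lengths
  | f + 1, PFrame.visit x y plen :: rest, visited, count, lengths =>
      if (x, y) = end_ then
        bstep grid end_ f rest visited (count + 1) (lengths ++ [plen])
      else
        let visited1 := pvSet2 visited x y true
        let stack1 := PFrame.unvisit x y :: rest
        let stack2 := ([(-1,0),(1,0),(0,-1),(0,1)] : List (Int × Int)).reverse.foldl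
          (fun st d =>
            let nx := x + d.1
            let ny := y + d.2
            if neighbor_ok grid visited1 nx ny then PFrame.visit nx ny (plen + 1) :: st else st)
          stack1
        bstep grid end_ f stack2 visited1 count lengths

def count_paths_and_lengths_alt (grid : List (List Int)) (start : Int × Int) (end_ : Int × Int) : Int × List Int :=
  if grid = [] then (0, [])
  else if (pvGet2 grid start.1 start.2).getD 0 ≠ 1 ∨ (pvGet2 grid end_.1 end_.2).getD 0 ≠ 1 then (0, [])
  else
    let rows := grid.length
    let cols := (grid.headD []).length
    let visited := List.replicate rows (List.replicate cols false)
    bstep grid end_ (2 * 4 ^ (rows * cols)) [PFrame.visit start.1 start.2 0] visited 0 []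

-- ===== PRECONDITION & SPEC =====
-- Pre_ excludes exactly (a) start/end positions whose lookup raises IndexError under Python's
-- short-circuit guard evaluation, and (b) ragged (non-rectangular) grids whose start and end
-- cells are both 1 — malformed input on which A's DFS usually raises IndexError (and where it
-- happens to return, B returns the same value; see claim cites).
def Pre_count_paths_and_lengths (grid : List (List Int)) (start : Int × Int) (end_ : Int × Int) : Prop :=
  grid = [] ∨
  (pvGet2 grid start.1 start.2 ≠ none ∧
   (pvGet2 grid start.1 start.2 = some 1 →
     pvGet2 grid end_.1 end_.2 ≠ none ∧
     (pvGet2 grid end_.1 end_.2 = some 1 →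
       ∀ row ∈ grid, row.length = (grid.headD []).length)))
instance (grid : List (List Int)) (start : Int × Int) (end_ : Int × Int) : Decidable (Pre_count_paths_and_lengths grid start end_) := by unfold Pre_count_paths_and_lengths; infer_instance

def pvWitness_count_paths_and_lengths : List (List Int) × (Int × Int) × (Int × Int) :=
  ([[1, 1], [1, 1]], (0, 0), (1, 1))

def Spec_count_paths_and_lengths (grid : List (List Int)) (start : Int × Int) (end_ : Int × Int) (out : Int × List Int) : Prop := out = count_paths_and_lengths_alt grid start end_
instance (grid : List (List Int)) (start : Int × Int) (end_ : Int × Int) (out : Int × List Int) : Decidable (Spec_count_paths_and_lengths grid start end_ out) := by unfold Spec_count_paths_and_lengths; infer_instance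

-- ===== CLAIM (what is proved, stated in full; the proofs are below) =====
def Claim_equal_count_paths_and_lengths : Prop := ∀ (grid : List (List Int)) (start : Int × Int) (end_ : Int × Int), Dom_count_paths_and_lengths grid start end_ → Pre_count_paths_and_lengths grid start end_ → Spec_count_paths_and_lengths grid start end_ (count_paths_and_lengths grid start end_)

-- ===== LEMMAS AND PROOFS =====
theorem pvIdx_lt {n : Nat} {i : Int} {k : Nat} (h : PySem.List.pyIdx? n i = some k) : k < n := by
  unfold PySem.List.pyIdx? at h
  split_ifs at h <;> simp_all <;> omega

theorem pvSet_self {α} {xs : List α} {n : Nat} {x : α} (h : xs[n]? = some x) : xs.set n x = xs := by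
  have hn : n < xs.length := by
    by_contra hc
    simp [List.getElem?_eq_none (by omega : xs.length ≤ n)] at h
  apply List.ext_getElem?
  intro m
  rw [List.getElem?_set]
  split_ifs with he
  · subst he; simpa using h.symm
  · rfl

-- decomposition of an in-range pvGet2
theorem pvGet2_some {α} {m : List (List α)} {i j : Int} {a : α} (h : pvGet2 m i j = some a) :
    ∃ ii jj r, PySem.List.pyIdx? m.length i = some ii ∧ m[ii]? = some r ∧
      PySem.List.pyIdx? r.length j = some jj ∧ r[jj]? = some a := by
  unfold pvGet2 PySem.List.pyGet? at h
  cases hii : PySem.List.pyIdx? m.length i with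
  | none => rw [hii] at h; simp at h
  | some ii =>
    rw [hii] at h
    cases hr : m[ii]? with
    | none => rw [Option.bind_some, hr] at h; simp at h
    | some r =>
      rw [Option.bind_some, hr, Option.bind_some] at h
      cases hjj : PySem.List.pyIdx? r.length j with
      | none => rw [hjj] at h; simp at h
      | some jj =>
        rw [hjj, Option.bind_some] at h
        exact ⟨ii, jj, r, rfl, hr, hjj, h⟩

-- the normal form of an in-range pvSet2
theorem pvSet2_eq {α} {m : List (List α)} {i j : Int} {ii jj : Nat} {r : List α}
    (hii : PySem.List.pyIdx? m.length i = some ii) (hr : m[ii]? = some r)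
    (hjj : PySem.List.pyIdx? r.length j = some jj) {a : α} :
    pvSet2 m i j a = m.set ii (r.set jj a) := by
  unfold pvSet2 PySem.List.pyGet?
  simp only [hii, Option.bind_some, hr]
  simp [PySem.List.pySetD, PySem.List.pySet?, hii, hjj]

theorem pvSet2_restore {v : List (List Bool)} {i j : Int} (h : pvGet2 v i j = some false) :
    pvSet2 (pvSet2 v i j true) i j false = v := by
  obtain ⟨ii, jj, r, hii, hr, hjj, ha⟩ := pvGet2_some h
  rw [pvSet2_eq hii hr hjj]
  have hlen : (v.set ii (r.set jj true)).length = v.length := by simp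
  have hii' : PySem.List.pyIdx? (v.set ii (r.set jj true)).length i = some ii := by rw [hlen]; exact hii
  have hr' : (v.set ii (r.set jj true))[ii]? = some (r.set jj true) := by
    have hlt : ii < v.length := pvIdx_lt hii
    simp [hlt]
  have hjj' : PySem.List.pyIdx? (r.set jj true).length j = some jj := by simp [hjj]
  rw [pvSet2_eq hii' hr' hjj']
  rw [List.set_set, List.set_set, pvSet_self ha, pvSet_self hr]

def fcount (v : List (List Bool)) : Nat := (v.map (fun r => r.count false)).sum

theorem rowcount {r : List Bool} {jj : Nat} (h : r[jj]? = some false) :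
    (r.set jj true).count false + 1 = r.count false := by
  induction r generalizing jj with
  | nil => simp at h
  | cons c t ih =>
    cases jj with
    | zero => simp at h; subst h; simp [List.count_cons]
    | succ m =>
      simp at h
      have := ih h
      rw [List.set_cons_succ]
      simp only [List.count_cons]
      omega

theorem fcount_set {v : List (List Bool)} {ii : Nat} {r r' : List Bool} (hr : v[ii]? = some r) :
    fcount (v.set ii r') + r.count false = fcount v + r'.count false := by
  induction v generalizing ii with
  | nil => simp at hr
  | cons h t ih =>
    cases ii with
    | zero => simp at hr; subst hr; simp [fcount]; omega
    | succ m =>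
      simp at hr
      have := ih hr
      simp [fcount] at this ⊢
      omega

theorem fcount_mark {v : List (List Bool)} {i j : Int} (h : pvGet2 v i j = some false) :
    fcount (pvSet2 v i j true) + 1 = fcount v := by
  obtain ⟨ii, jj, r, hii, hr, hjj, ha⟩ := pvGet2_some h
  rw [pvSet2_eq hii hr hjj]
  have h1 := fcount_set (v := v) (ii := ii) (r := r) (r' := r.set jj true) hr
  have h2 := rowcount ha
  omega

-- ===== proof layer =====
def goS (grid : List (List Int)) (end_ : Int × Int) : Nat → Int × Int → List (List Bool) → Int → Int × List Int × Nat
  | 0, _, _, _ => (0, [], 0)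
  | f + 1, s, v, l =>
    if s = end_ then (1, [l], 1)
    else
      let v1 := pvSet2 v s.1 s.2 true
      let u := ([(-1,0),(1,0),(0,-1),(0,1)] : List (Int × Int)).foldl (fun (acc : Int × List Int × Nat) d =>
        let n1 := s.1 + d.1
        let n2 := s.2 + d.2
        if is_valid n1 n2 grid v1 then
          let r := goS grid end_ f (n1, n2) v1 (l + 1)
          (acc.1 + r.1, acc.2.1 ++ r.2.1, acc.2.2 + r.2.2)
        else acc) (0, [], 0)
      (u.1, u.2.1, u.2.2 + 2)

theorem is_valid_visited {x y : Int} {grid : List (List Int)} {v : List (List Bool)}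
    (h : is_valid x y grid v = true) : pvGet2 v x y = some false := by
  unfold is_valid at h
  simp only [Bool.and_eq_true, Bool.not_eq_true'] at h
  cases ho : pvGet2 v x y with
  | none => rw [ho] at h; simp at h
  | some b => rw [ho] at h; simp at h; simp [h.2]

theorem neighbor_ok_eq (grid : List (List Int)) (v : List (List Bool)) (x y : Int) :
    neighbor_ok grid v x y = is_valid x y grid v := by
  simp [neighbor_ok, is_valid, Bool.and_assoc]

theorem fold_shift {fn : (Int × List Int × Nat) → (Int × Int) → (Int × List Int × Nat)}
    (hfn : ∀ acc d, fn acc d = (acc.1 + (fn (0, [], 0) d).1, acc.2.1 ++ (fn (0, [], 0) d).2.1, acc.2.2 + (fn (0, [], 0) d).2.2)) :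
    ∀ (ds : List (Int × Int)) (a : Int) (B : List Int) (sc : Nat),
      ds.foldl fn (a, B, sc)
        = (a + (ds.foldl fn (0, [], 0)).1, B ++ (ds.foldl fn (0, [], 0)).2.1, sc + (ds.foldl fn (0, [], 0)).2.2) := by
  intro ds
  induction ds with
  | nil => intro a B sc; simp
  | cons d t ih =>
    intro a B sc
    simp only [List.foldl_cons]
    rw [hfn (a, B, sc) d, hfn (0, [], 0) d]
    rw [ih, ih ((0:Int) + (fn (0, [], 0) d).1) ([] ++ (fn (0, [], 0) d).2.1) ((0:Nat) + (fn (0, [], 0) d).2.2)]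
    simp [add_assoc, List.append_assoc]

theorem rev_push {c : (Int × Int) → Bool} {f : (Int × Int) → PFrame} :
    ∀ (ds : List (Int × Int)) (st : List PFrame),
      ds.reverse.foldl (fun st d => if c d then f d :: st else st) st
        = ds.filterMap (fun d => if c d then some (f d) else none) ++ st := by
  intro ds
  induction ds with
  | nil => intro st; simp
  | cons d t ih =>
    intro st
    simp only [List.reverse_cons, List.foldl_append, List.foldl_cons, List.foldl_nil, List.filterMap_cons]
    rw [ih]
    split <;> simp

-- rfl unfoldings of the three recursions
theorem dfs_succ (f : Nat) (grid : List (List Int)) (s end_ : Int × Int) (v : List (List Bool)) (l : Int) (pls : List Int) :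
    dfs_count_paths (f+1) grid s end_ v l pls
      = if s = end_ then (1, pls ++ [l], v)
        else
          let st := ([(-1,0),(1,0),(0,-1),(0,1)] : List (Int × Int)).foldl
            (fun (acc : Int × List Int × List (List Bool)) d =>
              if is_valid (s.1 + d.1) (s.2 + d.2) grid acc.2.2 then
                let r := dfs_count_paths f grid (s.1 + d.1, s.2 + d.2) end_ acc.2.2 (l + 1) acc.2.1
                (acc.1 + r.1, r.2.1, r.2.2)
              else acc) (0, pls, pvSet2 v s.1 s.2 true)
          (st.1, st.2.1, pvSet2 st.2.2 s.1 s.2 false) := rfl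

theorem goS_succ (grid : List (List Int)) (end_ : Int × Int) (f : Nat) (s : Int × Int) (v : List (List Bool)) (l : Int) :
    goS grid end_ (f+1) s v l
      = if s = end_ then (1, [l], 1)
        else
          let u := ([(-1,0),(1,0),(0,-1),(0,1)] : List (Int × Int)).foldl
            (fun (acc : Int × List Int × Nat) d =>
              if is_valid (s.1 + d.1) (s.2 + d.2) grid (pvSet2 v s.1 s.2 true) then
                let r := goS grid end_ f (s.1 + d.1, s.2 + d.2) (pvSet2 v s.1 s.2 true) (l + 1)
                (acc.1 + r.1, acc.2.1 ++ r.2.1, acc.2.2 + r.2.2)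
              else acc) (0, [], 0)
          (u.1, u.2.1, u.2.2 + 2) := rfl

theorem bstep_nil (grid : List (List Int)) (end_ : Int × Int) (f : Nat) (v : List (List Bool)) (c : Int) (L : List Int) :
    bstep grid end_ f [] v c L = (c, L) := by cases f <;> rfl

theorem bstep_unvisit (grid : List (List Int)) (end_ : Int × Int) (f : Nat) (x y : Int) (rest : List PFrame) (v : List (List Bool)) (c : Int) (L : List Int) :
    bstep grid end_ (f+1) (PFrame.unvisit x y :: rest) v c L
      = bstep grid end_ f rest (pvSet2 v x y false) c L := rfl

theorem bstep_visit (grid : List (List Int)) (end_ : Int × Int) (f : Nat) (x y plen : Int) (rest : List PFrame) (v : List (List Bool)) (c : Int) (L : List Int) :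
    bstep grid end_ (f+1) (PFrame.visit x y plen :: rest) v c L
      = if (x, y) = end_ then bstep grid end_ f rest v (c + 1) (L ++ [plen])
        else
          bstep grid end_ f
            (([(-1,0),(1,0),(0,-1),(0,1)] : List (Int × Int)).reverse.foldl
              (fun st d =>
                if neighbor_ok grid (pvSet2 v x y true) (x + d.1) (y + d.2) then
                  PFrame.visit (x + d.1) (y + d.2) (plen + 1) :: st
                else st)
              (PFrame.unvisit x y :: rest))
            (pvSet2 v x y true) c L := rfl

theorem dfs_eq_goS (grid : List (List Int)) (end_ : Int × Int) :
    ∀ (f : Nat) (s : Int × Int) (v : List (List Bool)) (l : Int) (pls : List Int),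
      (s = end_ ∨ pvGet2 v s.1 s.2 = some false) →
      dfs_count_paths f grid s end_ v l pls
        = ((goS grid end_ f s v l).1, pls ++ (goS grid end_ f s v l).2.1, v) := by
  intro f
  induction f with
  | zero => intro s v l pls _; simp [dfs_count_paths, goS]
  | succ f ih =>
    intro s v l pls hP
    rw [dfs_succ, goS_succ]
    by_cases he : s = end_
    · rw [if_pos he, if_pos he]
    · rw [if_neg he, if_neg he]
      have hm : pvGet2 v s.1 s.2 = some false := hP.resolve_left he
      simp only
      have hfnG : ∀ (acc : Int × List Int × Nat) (d : Int × Int),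
          (fun (acc : Int × List Int × Nat) d =>
              if is_valid (s.1 + d.1) (s.2 + d.2) grid (pvSet2 v s.1 s.2 true) then
                let r := goS grid end_ f (s.1 + d.1, s.2 + d.2) (pvSet2 v s.1 s.2 true) (l + 1)
                (acc.1 + r.1, acc.2.1 ++ r.2.1, acc.2.2 + r.2.2)
              else acc) acc d
            = (acc.1 + ((fun (acc : Int × List Int × Nat) d =>
              if is_valid (s.1 + d.1) (s.2 + d.2) grid (pvSet2 v s.1 s.2 true) then
                let r := goS grid end_ f (s.1 + d.1, s.2 + d.2) (pvSet2 v s.1 s.2 true) (l + 1)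
                (acc.1 + r.1, acc.2.1 ++ r.2.1, acc.2.2 + r.2.2)
              else acc) (0, [], 0) d).1,
              acc.2.1 ++ ((fun (acc : Int × List Int × Nat) d =>
              if is_valid (s.1 + d.1) (s.2 + d.2) grid (pvSet2 v s.1 s.2 true) then
                let r := goS grid end_ f (s.1 + d.1, s.2 + d.2) (pvSet2 v s.1 s.2 true) (l + 1)
                (acc.1 + r.1, acc.2.1 ++ r.2.1, acc.2.2 + r.2.2)
              else acc) (0, [], 0) d).2.1,
              acc.2.2 + ((fun (acc : Int × List Int × Nat) d =>
              if is_valid (s.1 + d.1) (s.2 + d.2) grid (pvSet2 v s.1 s.2 true) then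
                let r := goS grid end_ f (s.1 + d.1, s.2 + d.2) (pvSet2 v s.1 s.2 true) (l + 1)
                (acc.1 + r.1, acc.2.1 ++ r.2.1, acc.2.2 + r.2.2)
              else acc) (0, [], 0) d).2.2) := by
        intro acc d
        by_cases hv : is_valid (s.1 + d.1) (s.2 + d.2) grid (pvSet2 v s.1 s.2 true) <;>
          simp [hv]
      have inner : ∀ (ds : List (Int × Int)) (pc : Int) (pl : List Int),
          ds.foldl
            (fun (acc : Int × List Int × List (List Bool)) d =>
              if is_valid (s.1 + d.1) (s.2 + d.2) grid acc.2.2 then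
                let r := dfs_count_paths f grid (s.1 + d.1, s.2 + d.2) end_ acc.2.2 (l + 1) acc.2.1
                (acc.1 + r.1, r.2.1, r.2.2)
              else acc) (pc, pl, pvSet2 v s.1 s.2 true)
          = (pc + ((ds.foldl
              (fun (acc : Int × List Int × Nat) d =>
                if is_valid (s.1 + d.1) (s.2 + d.2) grid (pvSet2 v s.1 s.2 true) then
                  let r := goS grid end_ f (s.1 + d.1, s.2 + d.2) (pvSet2 v s.1 s.2 true) (l + 1)
                  (acc.1 + r.1, acc.2.1 ++ r.2.1, acc.2.2 + r.2.2)
                else acc) (0, [], 0))).1,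
             pl ++ ((ds.foldl
              (fun (acc : Int × List Int × Nat) d =>
                if is_valid (s.1 + d.1) (s.2 + d.2) grid (pvSet2 v s.1 s.2 true) then
                  let r := goS grid end_ f (s.1 + d.1, s.2 + d.2) (pvSet2 v s.1 s.2 true) (l + 1)
                  (acc.1 + r.1, acc.2.1 ++ r.2.1, acc.2.2 + r.2.2)
                else acc) (0, [], 0))).2.1,
             pvSet2 v s.1 s.2 true) := by
        intro ds
        induction ds with
        | nil => intro pc pl; simp
        | cons d t iht =>
          intro pc pl
          simp only [List.foldl_cons]
          by_cases hv : is_valid (s.1 + d.1) (s.2 + d.2) grid (pvSet2 v s.1 s.2 true)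
          · have hchild := ih (s.1 + d.1, s.2 + d.2) (pvSet2 v s.1 s.2 true) (l + 1) pl
              (Or.inr (is_valid_visited hv))
            simp only [if_pos hv, hchild]
            rw [iht]
            rw [fold_shift hfnG t
              ((0:Int) + (goS grid end_ f (s.1 + d.1, s.2 + d.2) (pvSet2 v s.1 s.2 true) (l + 1)).1)
              ([] ++ (goS grid end_ f (s.1 + d.1, s.2 + d.2) (pvSet2 v s.1 s.2 true) (l + 1)).2.1)
              ((0:Nat) + (goS grid end_ f (s.1 + d.1, s.2 + d.2) (pvSet2 v s.1 s.2 true) (l + 1)).2.2)]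
            simp [add_assoc, List.append_assoc]
          · simp only [if_neg hv]
            exact iht pc pl
      rw [inner]
      simp [pvSet2_restore hm]



theorem bstep_eq_goS (grid : List (List Int)) (end_ : Int × Int) :
    ∀ (f : Nat) (s : Int × Int) (v : List (List Bool)) (l : Int) (rest : List PFrame) (c : Int) (L : List Int) (fB : Nat),
      (s = end_ ∨ pvGet2 v s.1 s.2 = some false) → fcount v < f →
      bstep grid end_ ((goS grid end_ f s v l).2.2 + fB) (PFrame.visit s.1 s.2 l :: rest) v c L
        = bstep grid end_ fB rest v (c + (goS grid end_ f s v l).1) (L ++ (goS grid end_ f s v l).2.1) := by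
  intro f
  induction f with
  | zero => intro s v l rest c L fB _ hf; omega
  | succ f ih =>
    intro s v l rest c L fB hP hf
    by_cases he : s = end_
    · have hG : goS grid end_ (f+1) s v l = (1, [l], 1) := by rw [goS_succ, if_pos he]
      rw [hG]
      dsimp only
      rw [show (1:Nat) + fB = fB + 1 by omega, bstep_visit,
        if_pos (show (s.1, s.2) = end_ by rw [Prod.mk.eta]; exact he)]
    · have hm : pvGet2 v s.1 s.2 = some false := hP.resolve_left he
      have hfc : fcount (pvSet2 v s.1 s.2 true) < f := by
        have := fcount_mark hm; omega
      have hfnG : ∀ (acc : Int × List Int × Nat) (d : Int × Int),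
          (fun (acc : Int × List Int × Nat) d =>
              if is_valid (s.1 + d.1) (s.2 + d.2) grid (pvSet2 v s.1 s.2 true) then
                (acc.1 + (goS grid end_ f (s.1 + d.1, s.2 + d.2) (pvSet2 v s.1 s.2 true) (l + 1)).1, acc.2.1 ++ (goS grid end_ f (s.1 + d.1, s.2 + d.2) (pvSet2 v s.1 s.2 true) (l + 1)).2.1, acc.2.2 + (goS grid end_ f (s.1 + d.1, s.2 + d.2) (pvSet2 v s.1 s.2 true) (l + 1)).2.2)
              else acc) acc d
            = (acc.1 + ((fun (acc : Int × List Int × Nat) d =>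
              if is_valid (s.1 + d.1) (s.2 + d.2) grid (pvSet2 v s.1 s.2 true) then
                (acc.1 + (goS grid end_ f (s.1 + d.1, s.2 + d.2) (pvSet2 v s.1 s.2 true) (l + 1)).1, acc.2.1 ++ (goS grid end_ f (s.1 + d.1, s.2 + d.2) (pvSet2 v s.1 s.2 true) (l + 1)).2.1, acc.2.2 + (goS grid end_ f (s.1 + d.1, s.2 + d.2) (pvSet2 v s.1 s.2 true) (l + 1)).2.2)
              else acc) (0, [], 0) d).1,
               acc.2.1 ++ ((fun (acc : Int × List Int × Nat) d =>
              if is_valid (s.1 + d.1) (s.2 + d.2) grid (pvSet2 v s.1 s.2 true) then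
                (acc.1 + (goS grid end_ f (s.1 + d.1, s.2 + d.2) (pvSet2 v s.1 s.2 true) (l + 1)).1, acc.2.1 ++ (goS grid end_ f (s.1 + d.1, s.2 + d.2) (pvSet2 v s.1 s.2 true) (l + 1)).2.1, acc.2.2 + (goS grid end_ f (s.1 + d.1, s.2 + d.2) (pvSet2 v s.1 s.2 true) (l + 1)).2.2)
              else acc) (0, [], 0) d).2.1,
               acc.2.2 + ((fun (acc : Int × List Int × Nat) d =>
              if is_valid (s.1 + d.1) (s.2 + d.2) grid (pvSet2 v s.1 s.2 true) then
                (acc.1 + (goS grid end_ f (s.1 + d.1, s.2 + d.2) (pvSet2 v s.1 s.2 true) (l + 1)).1, acc.2.1 ++ (goS grid end_ f (s.1 + d.1, s.2 + d.2) (pvSet2 v s.1 s.2 true) (l + 1)).2.1, acc.2.2 + (goS grid end_ f (s.1 + d.1, s.2 + d.2) (pvSet2 v s.1 s.2 true) (l + 1)).2.2)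
              else acc) (0, [], 0) d).2.2) := by
        intro acc d
        by_cases hv : is_valid (s.1 + d.1) (s.2 + d.2) grid (pvSet2 v s.1 s.2 true) <;> simp [hv]
      obtain ⟨U, hU⟩ : ∃ U : Int × List Int × Nat,
          U = ([(-1,0),(1,0),(0,-1),(0,1)] : List (Int × Int)).foldl (fun (acc : Int × List Int × Nat) d =>
              if is_valid (s.1 + d.1) (s.2 + d.2) grid (pvSet2 v s.1 s.2 true) then
                (acc.1 + (goS grid end_ f (s.1 + d.1, s.2 + d.2) (pvSet2 v s.1 s.2 true) (l + 1)).1, acc.2.1 ++ (goS grid end_ f (s.1 + d.1, s.2 + d.2) (pvSet2 v s.1 s.2 true) (l + 1)).2.1, acc.2.2 + (goS grid end_ f (s.1 + d.1, s.2 + d.2) (pvSet2 v s.1 s.2 true) (l + 1)).2.2)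
              else acc) (0, [], 0) := ⟨_, rfl⟩
      have hG : goS grid end_ (f+1) s v l = (U.1, U.2.1, U.2.2 + 2) := by
        rw [goS_succ, if_neg he]
        dsimp only
        rw [← hU]
      rw [hG]
      dsimp only
      rw [show U.2.2 + 2 + fB = (U.2.2 + (1 + fB)) + 1 by omega, bstep_visit,
        if_neg (show ¬ ((s.1, s.2) = end_) by rw [Prod.mk.eta]; exact he)]
      simp only [neighbor_ok_eq]
      rw [rev_push (c := fun d => is_valid (s.1 + d.1) (s.2 + d.2) grid (pvSet2 v s.1 s.2 true))
        (f := fun d => PFrame.visit (s.1 + d.1) (s.2 + d.2) (l + 1))]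
      have innerB : ∀ (ds : List (Int × Int)) (fB' : Nat) (c' : Int) (L' : List Int),
          bstep grid end_ ((ds.foldl (fun (acc : Int × List Int × Nat) d =>
              if is_valid (s.1 + d.1) (s.2 + d.2) grid (pvSet2 v s.1 s.2 true) then
                (acc.1 + (goS grid end_ f (s.1 + d.1, s.2 + d.2) (pvSet2 v s.1 s.2 true) (l + 1)).1, acc.2.1 ++ (goS grid end_ f (s.1 + d.1, s.2 + d.2) (pvSet2 v s.1 s.2 true) (l + 1)).2.1, acc.2.2 + (goS grid end_ f (s.1 + d.1, s.2 + d.2) (pvSet2 v s.1 s.2 true) (l + 1)).2.2)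
              else acc) (0, [], 0)).2.2 + fB')
              (ds.filterMap (fun d =>
                if is_valid (s.1 + d.1) (s.2 + d.2) grid (pvSet2 v s.1 s.2 true)
                then some (PFrame.visit (s.1 + d.1) (s.2 + d.2) (l + 1)) else none)
                ++ (PFrame.unvisit s.1 s.2 :: rest)) (pvSet2 v s.1 s.2 true) c' L'
            = bstep grid end_ fB' (PFrame.unvisit s.1 s.2 :: rest) (pvSet2 v s.1 s.2 true)
                (c' + (ds.foldl (fun (acc : Int × List Int × Nat) d =>
              if is_valid (s.1 + d.1) (s.2 + d.2) grid (pvSet2 v s.1 s.2 true) then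
                (acc.1 + (goS grid end_ f (s.1 + d.1, s.2 + d.2) (pvSet2 v s.1 s.2 true) (l + 1)).1, acc.2.1 ++ (goS grid end_ f (s.1 + d.1, s.2 + d.2) (pvSet2 v s.1 s.2 true) (l + 1)).2.1, acc.2.2 + (goS grid end_ f (s.1 + d.1, s.2 + d.2) (pvSet2 v s.1 s.2 true) (l + 1)).2.2)
              else acc) (0, [], 0)).1) (L' ++ (ds.foldl (fun (acc : Int × List Int × Nat) d =>
              if is_valid (s.1 + d.1) (s.2 + d.2) grid (pvSet2 v s.1 s.2 true) then
                (acc.1 + (goS grid end_ f (s.1 + d.1, s.2 + d.2) (pvSet2 v s.1 s.2 true) (l + 1)).1, acc.2.1 ++ (goS grid end_ f (s.1 + d.1, s.2 + d.2) (pvSet2 v s.1 s.2 true) (l + 1)).2.1, acc.2.2 + (goS grid end_ f (s.1 + d.1, s.2 + d.2) (pvSet2 v s.1 s.2 true) (l + 1)).2.2)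
              else acc) (0, [], 0)).2.1) := by
        intro ds
        induction ds with
        | nil => intro fB' c' L'; simp
        | cons d t iht =>
          intro fB' c' L'
          simp only [List.foldl_cons, List.filterMap_cons, if_pos, if_neg]
          by_cases hv : is_valid (s.1 + d.1) (s.2 + d.2) grid (pvSet2 v s.1 s.2 true)
          · simp only [if_pos hv, zero_add, List.nil_append]
            rw [fold_shift hfnG t ((goS grid end_ f (s.1 + d.1, s.2 + d.2) (pvSet2 v s.1 s.2 true) (l + 1)).1) ((goS grid end_ f (s.1 + d.1, s.2 + d.2) (pvSet2 v s.1 s.2 true) (l + 1)).2.1) ((goS grid end_ f (s.1 + d.1, s.2 + d.2) (pvSet2 v s.1 s.2 true) (l + 1)).2.2)]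
            have hchild := ih (s.1 + d.1, s.2 + d.2) (pvSet2 v s.1 s.2 true) (l + 1)
              (t.filterMap (fun d =>
                if is_valid (s.1 + d.1) (s.2 + d.2) grid (pvSet2 v s.1 s.2 true)
                then some (PFrame.visit (s.1 + d.1) (s.2 + d.2) (l + 1)) else none)
                ++ (PFrame.unvisit s.1 s.2 :: rest)) c' L'
              ((t.foldl (fun (acc : Int × List Int × Nat) d =>
              if is_valid (s.1 + d.1) (s.2 + d.2) grid (pvSet2 v s.1 s.2 true) then
                (acc.1 + (goS grid end_ f (s.1 + d.1, s.2 + d.2) (pvSet2 v s.1 s.2 true) (l + 1)).1, acc.2.1 ++ (goS grid end_ f (s.1 + d.1, s.2 + d.2) (pvSet2 v s.1 s.2 true) (l + 1)).2.1, acc.2.2 + (goS grid end_ f (s.1 + d.1, s.2 + d.2) (pvSet2 v s.1 s.2 true) (l + 1)).2.2)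
              else acc) (0, [], 0)).2.2 + fB')
              (Or.inr (is_valid_visited hv)) hfc
            dsimp only at hchild
            rw [show (goS grid end_ f (s.1 + d.1, s.2 + d.2) (pvSet2 v s.1 s.2 true) (l + 1)).2.2 + (t.foldl (fun (acc : Int × List Int × Nat) d =>
              if is_valid (s.1 + d.1) (s.2 + d.2) grid (pvSet2 v s.1 s.2 true) then
                (acc.1 + (goS grid end_ f (s.1 + d.1, s.2 + d.2) (pvSet2 v s.1 s.2 true) (l + 1)).1, acc.2.1 ++ (goS grid end_ f (s.1 + d.1, s.2 + d.2) (pvSet2 v s.1 s.2 true) (l + 1)).2.1, acc.2.2 + (goS grid end_ f (s.1 + d.1, s.2 + d.2) (pvSet2 v s.1 s.2 true) (l + 1)).2.2)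
              else acc) (0, [], 0)).2.2 + fB'
                = (goS grid end_ f (s.1 + d.1, s.2 + d.2) (pvSet2 v s.1 s.2 true) (l + 1)).2.2 + ((t.foldl (fun (acc : Int × List Int × Nat) d =>
              if is_valid (s.1 + d.1) (s.2 + d.2) grid (pvSet2 v s.1 s.2 true) then
                (acc.1 + (goS grid end_ f (s.1 + d.1, s.2 + d.2) (pvSet2 v s.1 s.2 true) (l + 1)).1, acc.2.1 ++ (goS grid end_ f (s.1 + d.1, s.2 + d.2) (pvSet2 v s.1 s.2 true) (l + 1)).2.1, acc.2.2 + (goS grid end_ f (s.1 + d.1, s.2 + d.2) (pvSet2 v s.1 s.2 true) (l + 1)).2.2)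
              else acc) (0, [], 0)).2.2 + fB') by omega]
            refine hchild.trans ?_
            rw [iht]
            simp [add_assoc, List.append_assoc]
          · simp only [if_neg hv, zero_add, List.nil_append]
            exact iht fB' c' L'
      rw [hU]
      rw [innerB [(-1,0),(1,0),(0,-1),(0,1)] (1 + fB) c L]
      rw [show (1:Nat) + fB = fB + 1 by omega, bstep_unvisit, pvSet2_restore hm, ← hU]

theorem goS_steps (grid : List (List Int)) (end_ : Int × Int) :
    ∀ (f : Nat) (s : Int × Int) (v : List (List Bool)) (l : Int),
      (s = end_ ∨ pvGet2 v s.1 s.2 = some false) → fcount v < f →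
      (goS grid end_ f s v l).2.2 ≤ 2 * 4 ^ (fcount v) - 1 := by
  intro f
  induction f with
  | zero => intro s v l _ hf; omega
  | succ f ih =>
    intro s v l hP hf
    have hpow : 1 ≤ 4 ^ fcount v := Nat.one_le_pow _ _ (by norm_num)
    by_cases he : s = end_
    · have hG : goS grid end_ (f+1) s v l = (1, [l], 1) := by rw [goS_succ, if_pos he]
      rw [hG]
      dsimp only
      omega
    · have hm : pvGet2 v s.1 s.2 = some false := hP.resolve_left he
      have hk : fcount (pvSet2 v s.1 s.2 true) + 1 = fcount v := fcount_mark hm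
      have hfc : fcount (pvSet2 v s.1 s.2 true) < f := by omega
      obtain ⟨U, hU⟩ : ∃ U : Int × List Int × Nat,
          U = ([(-1,0),(1,0),(0,-1),(0,1)] : List (Int × Int)).foldl (fun (acc : Int × List Int × Nat) d =>
              if is_valid (s.1 + d.1) (s.2 + d.2) grid (pvSet2 v s.1 s.2 true) then
                (acc.1 + (goS grid end_ f (s.1 + d.1, s.2 + d.2) (pvSet2 v s.1 s.2 true) (l + 1)).1, acc.2.1 ++ (goS grid end_ f (s.1 + d.1, s.2 + d.2) (pvSet2 v s.1 s.2 true) (l + 1)).2.1, acc.2.2 + (goS grid end_ f (s.1 + d.1, s.2 + d.2) (pvSet2 v s.1 s.2 true) (l + 1)).2.2)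
              else acc) (0, [], 0) := ⟨_, rfl⟩
      have hG : goS grid end_ (f+1) s v l = (U.1, U.2.1, U.2.2 + 2) := by
        rw [goS_succ, if_neg he]
        dsimp only
        rw [← hU]
      have hfnG : ∀ (acc : Int × List Int × Nat) (d : Int × Int),
          (fun (acc : Int × List Int × Nat) d =>
              if is_valid (s.1 + d.1) (s.2 + d.2) grid (pvSet2 v s.1 s.2 true) then
                (acc.1 + (goS grid end_ f (s.1 + d.1, s.2 + d.2) (pvSet2 v s.1 s.2 true) (l + 1)).1, acc.2.1 ++ (goS grid end_ f (s.1 + d.1, s.2 + d.2) (pvSet2 v s.1 s.2 true) (l + 1)).2.1, acc.2.2 + (goS grid end_ f (s.1 + d.1, s.2 + d.2) (pvSet2 v s.1 s.2 true) (l + 1)).2.2)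
              else acc) acc d
            = (acc.1 + ((fun (acc : Int × List Int × Nat) d =>
              if is_valid (s.1 + d.1) (s.2 + d.2) grid (pvSet2 v s.1 s.2 true) then
                (acc.1 + (goS grid end_ f (s.1 + d.1, s.2 + d.2) (pvSet2 v s.1 s.2 true) (l + 1)).1, acc.2.1 ++ (goS grid end_ f (s.1 + d.1, s.2 + d.2) (pvSet2 v s.1 s.2 true) (l + 1)).2.1, acc.2.2 + (goS grid end_ f (s.1 + d.1, s.2 + d.2) (pvSet2 v s.1 s.2 true) (l + 1)).2.2)
              else acc) (0, [], 0) d).1,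
               acc.2.1 ++ ((fun (acc : Int × List Int × Nat) d =>
              if is_valid (s.1 + d.1) (s.2 + d.2) grid (pvSet2 v s.1 s.2 true) then
                (acc.1 + (goS grid end_ f (s.1 + d.1, s.2 + d.2) (pvSet2 v s.1 s.2 true) (l + 1)).1, acc.2.1 ++ (goS grid end_ f (s.1 + d.1, s.2 + d.2) (pvSet2 v s.1 s.2 true) (l + 1)).2.1, acc.2.2 + (goS grid end_ f (s.1 + d.1, s.2 + d.2) (pvSet2 v s.1 s.2 true) (l + 1)).2.2)
              else acc) (0, [], 0) d).2.1,
               acc.2.2 + ((fun (acc : Int × List Int × Nat) d =>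
              if is_valid (s.1 + d.1) (s.2 + d.2) grid (pvSet2 v s.1 s.2 true) then
                (acc.1 + (goS grid end_ f (s.1 + d.1, s.2 + d.2) (pvSet2 v s.1 s.2 true) (l + 1)).1, acc.2.1 ++ (goS grid end_ f (s.1 + d.1, s.2 + d.2) (pvSet2 v s.1 s.2 true) (l + 1)).2.1, acc.2.2 + (goS grid end_ f (s.1 + d.1, s.2 + d.2) (pvSet2 v s.1 s.2 true) (l + 1)).2.2)
              else acc) (0, [], 0) d).2.2) := by
        intro acc d
        by_cases hv : is_valid (s.1 + d.1) (s.2 + d.2) grid (pvSet2 v s.1 s.2 true) <;> simp [hv]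
      have inner : ∀ (ds : List (Int × Int)),
          (ds.foldl (fun (acc : Int × List Int × Nat) d =>
              if is_valid (s.1 + d.1) (s.2 + d.2) grid (pvSet2 v s.1 s.2 true) then
                (acc.1 + (goS grid end_ f (s.1 + d.1, s.2 + d.2) (pvSet2 v s.1 s.2 true) (l + 1)).1, acc.2.1 ++ (goS grid end_ f (s.1 + d.1, s.2 + d.2) (pvSet2 v s.1 s.2 true) (l + 1)).2.1, acc.2.2 + (goS grid end_ f (s.1 + d.1, s.2 + d.2) (pvSet2 v s.1 s.2 true) (l + 1)).2.2)
              else acc) (0, [], 0)).2.2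
            ≤ ds.length * (2 * 4 ^ (fcount (pvSet2 v s.1 s.2 true)) - 1) := by
        intro ds
        induction ds with
        | nil => simp
        | cons d t iht =>
          simp only [List.foldl_cons, List.length_cons]
          by_cases hv : is_valid (s.1 + d.1) (s.2 + d.2) grid (pvSet2 v s.1 s.2 true)
          · simp only [if_pos hv, zero_add, List.nil_append]
            rw [fold_shift hfnG t ((goS grid end_ f (s.1 + d.1, s.2 + d.2) (pvSet2 v s.1 s.2 true) (l + 1)).1) ((goS grid end_ f (s.1 + d.1, s.2 + d.2) (pvSet2 v s.1 s.2 true) (l + 1)).2.1) ((goS grid end_ f (s.1 + d.1, s.2 + d.2) (pvSet2 v s.1 s.2 true) (l + 1)).2.2)]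
            have hc := ih (s.1 + d.1, s.2 + d.2) (pvSet2 v s.1 s.2 true) (l + 1)
              (Or.inr (is_valid_visited hv)) hfc
            try dsimp only at hc
            rw [Nat.succ_mul]
            dsimp only
            omega
          · simp only [if_neg hv, zero_add, List.nil_append]
            rw [Nat.succ_mul]
            omega
      rw [hG]
      dsimp only
      have hU4 := inner [(-1,0),(1,0),(0,-1),(0,1)]
      rw [← hU] at hU4
      have h4 : (4:Nat) ^ (fcount v) = 4 * 4 ^ (fcount (pvSet2 v s.1 s.2 true)) := by
        rw [← hk, pow_succ]
        ring
      have hpow1 : 1 ≤ 4 ^ fcount (pvSet2 v s.1 s.2 true) := Nat.one_le_pow _ _ (by norm_num)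
      simp only [List.length_cons, List.length_nil] at hU4
      omega

theorem fcount_replicate (R C : Nat) : fcount (List.replicate R (List.replicate C false)) = R * C := by
  simp [fcount, List.map_replicate, List.count_replicate, List.sum_replicate]

theorem pvGet2_build {α : Type} {m : List (List α)} {i j : Int} {ii jj : Nat} {r : List α} {a : α}
    (hii : PySem.List.pyIdx? m.length i = some ii) (hr : m[ii]? = some r)
    (hjj : PySem.List.pyIdx? r.length j = some jj) (ha : r[jj]? = some a) :
    pvGet2 m i j = some a := by
  unfold pvGet2 PySem.List.pyGet?
  rw [hii, Option.bind_some, hr, Option.bind_some, hjj, Option.bind_some]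
  exact ha

theorem root_false {grid : List (List Int)} {s : Int × Int}
    (hs : pvGet2 grid s.1 s.2 = some 1)
    (hrect : ∀ row ∈ grid, row.length = (grid.headD []).length) :
    pvGet2 (List.replicate grid.length (List.replicate (grid.headD []).length false)) s.1 s.2
      = some false := by
  obtain ⟨ii, jj, r, hii, hr, hjj, ha⟩ := pvGet2_some hs
  have hiiL : ii < grid.length := pvIdx_lt hii
  have hrC : r.length = (grid.headD []).length := hrect r (List.mem_of_getElem? hr)
  have hjjC : jj < (grid.headD []).length := by have := pvIdx_lt hjj; omega
  apply pvGet2_build (ii := ii) (jj := jj) (r := List.replicate (grid.headD []).length false)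
  · simpa using hii
  · simp [List.getElem?_replicate, hiiL]
  · rw [hrC] at hjj; simpa using hjj
  · simp only [List.getElem?_replicate, if_pos hjjC]

-- ===== VERDICT (the statement is the Claim_ definition above) =====
theorem count_paths_and_lengths_spec : Claim_equal_count_paths_and_lengths := by
  unfold Claim_equal_count_paths_and_lengths
  intro grid s e _hDom hPre
  unfold Spec_count_paths_and_lengths
  unfold count_paths_and_lengths count_paths_and_lengths_alt
  by_cases hg : grid = []
  · simp [hg]
  · rw [if_neg hg, if_neg hg]
    by_cases hguard : (pvGet2 grid s.1 s.2).getD 0 ≠ 1 ∨ (pvGet2 grid e.1 e.2).getD 0 ≠ 1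
    · rw [if_pos hguard, if_pos hguard]
    · rw [if_neg hguard, if_neg hguard]
      push_neg at hguard
      obtain ⟨hs0, he0⟩ := hguard
      have hs1 : pvGet2 grid s.1 s.2 = some 1 := by
        cases ho : pvGet2 grid s.1 s.2 with
        | none => rw [ho] at hs0; simp at hs0
        | some a => rw [ho] at hs0; simp at hs0; simp [hs0]
      have he1 : pvGet2 grid e.1 e.2 = some 1 := by
        cases ho : pvGet2 grid e.1 e.2 with
        | none => rw [ho] at he0; simp at he0
        | some a => rw [ho] at he0; simp at he0; simp [he0]
      have hrect : ∀ row ∈ grid, row.length = (grid.headD []).length := by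
        rcases hPre with h | ⟨_, h2⟩
        · exact absurd h hg
        · exact (h2 hs1).2 he1
      dsimp only
      have hm := root_false hs1 hrect
      have hfcv : fcount (List.replicate grid.length (List.replicate (grid.headD []).length false))
          = grid.length * (grid.headD []).length := fcount_replicate _ _
      rw [dfs_eq_goS grid e (grid.length * (grid.headD []).length + 1) s _ 0 [] (Or.inr hm)]
      have hsteps := goS_steps grid e (grid.length * (grid.headD []).length + 1) s
        (List.replicate grid.length (List.replicate (grid.headD []).length false)) 0
        (Or.inr hm) (by rw [hfcv]; omega)
      rw [hfcv] at hsteps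
      obtain ⟨q, hq⟩ : ∃ q, 2 * 4 ^ (grid.length * (grid.headD []).length)
          = (goS grid e (grid.length * (grid.headD []).length + 1) s
              (List.replicate grid.length (List.replicate (grid.headD []).length false)) 0).2.2 + q :=
        ⟨2 * 4 ^ (grid.length * (grid.headD []).length)
          - (goS grid e (grid.length * (grid.headD []).length + 1) s
              (List.replicate grid.length (List.replicate (grid.headD []).length false)) 0).2.2,
         by omega⟩
      rw [hq]
      rw [bstep_eq_goS grid e (grid.length * (grid.headD []).length + 1) s
        (List.replicate grid.length (List.replicate (grid.headD []).length false)) 0 [] 0 [] q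
        (Or.inr hm) (by rw [hfcv]; omega)]
      rw [bstep_nil]
      simp
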